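-- pv_equiv track=rewrite | github.com/SeppoPakonen/Maestro | maestro/issues/issue_store.py | _find_metadata_insert_index
-- ===== SOURCE A (Python) =====
-- from typing import Dict, List, Optional, Tuple
--
-- def _find_metadata_insert_index(lines: List[str]) -> int:
--     insert_at = 0
--     for idx, line in enumerate(lines):
--         if line.startswith("\""):
--             insert_at = idx + 1
--         elif insert_at > 0 and line.strip() == "":
--             break
--     return max(insert_at, 2)
-- ===== SOURCE B (Python) =====
-- from typing import List
--
-- def _find_metadata_insert_index(lines: List[str]) -> int:
--     # Pass 1: find the cut point -- first blank line that comes after a quote line.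
--     cut = len(lines)
--     seen_quote = False
--     for i, line in enumerate(lines):
--         if line.startswith("\""):
--             seen_quote = True
--         elif seen_quote and line.strip() == "":
--             cut = i
--             break
--     # Pass 2: last quote line before the cut point.
--     insert_at = 0
--     for j, line in enumerate(lines[:cut]):
--         if line.startswith("\""):
--             insert_at = j + 1
--     return max(insert_at, 2)
-- ===== Notes on version B (the rewrite author's own statement) =====
-- stated objective: alternative
-- what changed: Replaces A's single interleaved stateful loop (tracking the running insert index and breaking inline) with two separate passes: a first scan that only locates the cut point (first blank line after a quote line), then a scan of the prefix before the cut for the last quote line.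
import Mathlib
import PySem

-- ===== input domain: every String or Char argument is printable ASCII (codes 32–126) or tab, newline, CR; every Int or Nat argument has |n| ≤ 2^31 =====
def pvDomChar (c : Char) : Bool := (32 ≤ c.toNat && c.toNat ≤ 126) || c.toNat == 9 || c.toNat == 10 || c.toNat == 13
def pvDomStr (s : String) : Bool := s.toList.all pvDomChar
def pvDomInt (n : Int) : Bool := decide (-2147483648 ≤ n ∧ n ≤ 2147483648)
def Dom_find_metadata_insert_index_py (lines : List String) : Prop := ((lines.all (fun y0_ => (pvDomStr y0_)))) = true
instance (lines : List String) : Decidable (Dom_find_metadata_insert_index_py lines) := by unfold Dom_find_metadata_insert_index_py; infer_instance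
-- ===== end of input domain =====

-- B is an alternative decomposition of A: two separate passes (find the cut point, then the last
-- quote line before it) instead of A's single interleaved stateful loop; same cost, same values.

-- ===== PORT A =====
-- A's single loop: insert_at updated on quote lines, break on a blank line once insert_at > 0.
def pvALoop : List String → Nat → Int → Int
  | [], _, insert_at => insert_at
  | l :: rest, idx, insert_at =>
      if PySem.Str.startswith l "\"" then pvALoop rest (idx + 1) ((idx : Int) + 1)
      else if insert_at > 0 ∧ PySem.Str.strip l = "" then insert_at
      else pvALoop rest (idx + 1) insert_at

def find_metadata_insert_index_py (lines : List String) : Int :=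
  max (pvALoop lines 0 0) 2

-- ===== PORT B =====
-- Pass 1: number of lines before the cut point (first blank line after a quote line), as in Source B.
def pvFindCut : List String → Bool → Nat
  | [], _ => 0
  | l :: rest, seen =>
      if PySem.Str.startswith l "\"" then 1 + pvFindCut rest true
      else if seen ∧ PySem.Str.strip l = "" then 0
      else 1 + pvFindCut rest seen

-- Pass 2: last quote line's index + 1 over the prefix, as in Source B.
def pvLastQuote : List String → Nat → Int → Int
  | [], _, acc => acc
  | l :: rest, j, acc =>
      pvLastQuote rest (j + 1) (if PySem.Str.startswith l "\"" then (j : Int) + 1 else acc)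

def find_metadata_insert_index_py_alt (lines : List String) : Int :=
  max (pvLastQuote (lines.take (pvFindCut lines false)) 0 0) 2

-- ===== PRECONDITION & SPEC =====
def Spec_find_metadata_insert_index_py (lines : List String) (out : Int) : Prop := out = find_metadata_insert_index_py_alt lines
instance (lines : List String) (out : Int) : Decidable (Spec_find_metadata_insert_index_py lines out) := by unfold Spec_find_metadata_insert_index_py; infer_instance

-- ===== CLAIM (what is proved, stated in full; the proofs are below) =====
def Claim_equal_find_metadata_insert_index_py : Prop := ∀ (lines : List String), Dom_find_metadata_insert_index_py lines → Spec_find_metadata_insert_index_py lines (find_metadata_insert_index_py lines)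

-- ===== LEMMAS AND PROOFS =====

-- Invariant tying A's loop to B's two passes: `seen` is exactly `insert_at > 0`.
theorem pvLoop_eq (lines : List String) : ∀ (idx : Nat) (ia : Int) (seen : Bool),
    (seen = true ↔ ia > 0) →
    pvALoop lines idx ia = pvLastQuote (lines.take (pvFindCut lines seen)) idx ia := by
  induction lines with
  | nil => intro idx ia seen _; simp [pvALoop, pvFindCut, pvLastQuote]
  | cons l rest ih =>
    intro idx ia seen hseen
    by_cases hq : PySem.Str.startswith l "\""
    · simp only [pvALoop, pvFindCut, hq, if_true, Nat.add_comm 1, List.take_succ_cons, pvLastQuote]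
      exact ih (idx + 1) ((idx : Int) + 1) true (by simp)
    · rw [Bool.not_eq_true] at hq
      by_cases hb : PySem.Str.strip l = ""
      · rcases Bool.eq_false_or_eq_true seen with hs | hs <;> subst hs
        · have hia : ia > 0 := hseen.mp rfl
          simp only [pvALoop, pvFindCut, hq, Bool.false_eq_true, if_false, hb, hia,
            and_self, if_true, List.take_zero, pvLastQuote]
        · have hia : ¬ ia > 0 := fun h => by simpa using hseen.mpr h
          simp only [pvALoop, pvFindCut, hq, Bool.false_eq_true, if_false, hb, hia,
            and_true, Nat.add_comm 1, List.take_succ_cons, pvLastQuote]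
          exact ih (idx + 1) ia false hseen
      · simp only [pvALoop, pvFindCut, hq, Bool.false_eq_true, if_false, hb, and_false,
          Nat.add_comm 1, List.take_succ_cons, pvLastQuote]
        exact ih (idx + 1) ia seen hseen

-- ===== VERDICT (by name: the statement is the Claim_ definition above) =====
theorem find_metadata_insert_index_py_spec : Claim_equal_find_metadata_insert_index_py := by
  intro lines _
  unfold Spec_find_metadata_insert_index_py find_metadata_insert_index_py find_metadata_insert_index_py_alt
  rw [pvLoop_eq lines 0 0 false (by simp)]
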